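-- pv_equiv track=rewrite | github.com/alestarbucks/ofappdl | generators/unconnectednoise/parking/parking-noise.py | generate_predicates
-- ===== SOURCE A (Python) =====
-- def generate_predicates(curbs, cars):
--     result = ""
--
--     i = 0
--     curb_index = 0
--     last_car = None
--     for c in cars:
--         if i == 0:
--             result += "\t(at-curb " + c +")\n\t(at-curb-num " + c + " " + curbs[curb_index] + ")\n"
--             last_car = c
--             i += 1
--         else:
--             result += "\t(behind-car " + c + " " + last_car + ")\n\t(car-clear " + c + ")\n"
--             i = 0
--             curb_index += 1
--
--     if i == 1:
--         result += "\t(car-clear " + last_car + ")\n"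
--
--     return result
-- ===== SOURCE B (Python) =====
-- def generate_predicates(curbs, cars):
--     # Pairwise decomposition instead of A's i/last_car/curb_index state machine:
--     # cars[k] (k even) is the lead car at curbs[k // 2]; cars[k + 1], if any,
--     # sits behind it.  Pieces are collected and joined at the end; plain '+'
--     # concatenation is kept inside each piece, as in A.
--     pieces = []
--     for k in range(0, len(cars), 2):
--         lead = cars[k]
--         pieces.append("\t(at-curb " + lead + ")\n\t(at-curb-num " + lead + " " + curbs[k // 2] + ")\n")
--         if k + 1 < len(cars):
--             f = cars[k + 1]
--             pieces.append("\t(behind-car " + f + " " + lead + ")\n\t(car-clear " + f + ")\n")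
--         else:
--             pieces.append("\t(car-clear " + lead + ")\n")
--     return "".join(pieces)
-- ===== Notes on version B (the rewrite author's own statement) =====
-- stated objective: alternative
-- what changed: Replaced the i/last_car/curb_index state machine and trailing fix-up with a single pairwise loop over range(0, len(cars), 2) that appends pieces and joins them at the end.
import Mathlib
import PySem

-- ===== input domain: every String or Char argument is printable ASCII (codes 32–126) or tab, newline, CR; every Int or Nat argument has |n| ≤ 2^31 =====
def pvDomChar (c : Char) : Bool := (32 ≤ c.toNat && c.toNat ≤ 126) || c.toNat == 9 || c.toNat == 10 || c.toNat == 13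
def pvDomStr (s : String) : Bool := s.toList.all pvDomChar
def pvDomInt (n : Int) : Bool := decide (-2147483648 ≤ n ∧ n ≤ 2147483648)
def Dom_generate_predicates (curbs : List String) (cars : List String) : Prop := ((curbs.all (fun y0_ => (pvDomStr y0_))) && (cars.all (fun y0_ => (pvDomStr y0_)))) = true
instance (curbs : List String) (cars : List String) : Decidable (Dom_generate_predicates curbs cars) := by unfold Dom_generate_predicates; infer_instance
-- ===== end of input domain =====

-- B replaces A's i/last_car/curb_index state machine by a single pairwise loop
-- over range(0, len(cars), 2) that collects pieces and joins them (objective: alternative).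

-- ===== PORT A =====
-- loop body of A's 'for c in cars', over the state (result, i, curb_index, last_car)
def gpStep (curbs : List String) (st : String × Int × Int × Option String) (c : String) : String × Int × Int × Option String :=
  match st with
  | (result, i, curb_index, last_car) =>
    if i == 0 then
      (result ++ "\t(at-curb " ++ c ++ ")\n\t(at-curb-num " ++ c ++ " " ++ (PySem.List.pyGet? curbs curb_index).getD "" ++ ")\n",
       i + 1, curb_index, some c)
    else
      (result ++ "\t(behind-car " ++ c ++ " " ++ last_car.getD "" ++ ")\n\t(car-clear " ++ c ++ ")\n",
       0, curb_index + 1, last_car)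

-- A's trailing 'if i == 1' fix-up
def gpFinish (st : String × Int × Int × Option String) : String :=
  match st with
  | (result, i, _, last_car) =>
    if i == 1 then result ++ "\t(car-clear " ++ last_car.getD "" ++ ")\n" else result

def generate_predicates (curbs : List String) (cars : List String) : String :=
  gpFinish (cars.foldl (gpStep curbs) ("", 0, 0, none))

-- ===== PORT B =====
-- loop body of Source B's 'for k in range(0, len(cars), 2)', over the pieces list
def gpBStep (curbs : List String) (cars : List String) (pieces : List String) (k : Int) : List String :=
  let lead := (PySem.List.pyGet? cars k).getD ""
  let pieces := pieces ++ ["\t(at-curb " ++ lead ++ ")\n\t(at-curb-num " ++ lead ++ " " ++ (PySem.List.pyGet? curbs (PySem.Int.floordiv k 2)).getD "" ++ ")\n"]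
  if k + 1 < (cars.length : Int) then
    let f := (PySem.List.pyGet? cars (k + 1)).getD ""
    pieces ++ ["\t(behind-car " ++ f ++ " " ++ lead ++ ")\n\t(car-clear " ++ f ++ ")\n"]
  else
    pieces ++ ["\t(car-clear " ++ lead ++ ")\n"]

def generate_predicates_alt (curbs : List String) (cars : List String) : String :=
  PySem.Str.join "" ((PySem.List.pyRange 0 (cars.length : Int) 2).foldl (gpBStep curbs cars) [])

-- ===== PRECONDITION & SPEC =====
-- Pre_ excludes exactly the inputs where A raises IndexError: more cars than two per curb.
def Pre_generate_predicates (curbs : List String) (cars : List String) : Prop :=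
  cars.length ≤ 2 * curbs.length

instance (curbs : List String) (cars : List String) : Decidable (Pre_generate_predicates curbs cars) := by
  unfold Pre_generate_predicates; infer_instance

def pvWitness_generate_predicates : List String × List String := (["curb1", "curb2"], ["car1", "car2", "car3"])

def Spec_generate_predicates (curbs : List String) (cars : List String) (out : String) : Prop := out = generate_predicates_alt curbs cars
instance (curbs : List String) (cars : List String) (out : String) : Decidable (Spec_generate_predicates curbs cars out) := by unfold Spec_generate_predicates; infer_instance

-- ===== CLAIM (what is proved, stated in full; the proofs are below) =====
def Claim_equal_generate_predicates : Prop := ∀ (curbs : List String) (cars : List String), Dom_generate_predicates curbs cars → Pre_generate_predicates curbs cars → Spec_generate_predicates curbs cars (generate_predicates curbs cars)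

-- ===== LEMMAS AND PROOFS =====

-- Common reference shape: the output, pairwise-recursively.
def gpRef (curbs : List String) (cars : List String) : String :=
  match cars with
  | [] => ""
  | lead :: rest =>
    let head := "\t(at-curb " ++ lead ++ ")\n\t(at-curb-num " ++ lead ++ " " ++ (PySem.List.pyGet? curbs 0).getD "" ++ ")\n"
    match rest with
    | [] => head ++ "\t(car-clear " ++ lead ++ ")\n"
    | f :: rest' =>
      head ++ "\t(behind-car " ++ f ++ " " ++ lead ++ ")\n\t(car-clear " ++ f ++ ")\n"
        ++ gpRef (curbs.drop 1) rest'

-- A's loop invariant: from a fresh state (i = 0, curb index n), A's loop + fix-up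
-- produce exactly res ++ the reference output on the remaining cars and curbs.
theorem gp_loop : ∀ (cars curbs : List String) (res : String) (n : ℕ) (lc : Option String),
    cars.length + 2 * n ≤ 2 * curbs.length →
    gpFinish (cars.foldl (gpStep curbs) (res, (0 : Int), (n : Int), lc))
      = res ++ gpRef (curbs.drop n) cars
  | [], curbs, res, n, lc, h => by
    simp [gpFinish, gpRef]
  | [c], curbs, res, n, lc, h => by
    have hn : n < curbs.length := by simp at h; omega
    simp [gpStep, gpFinish, gpRef, PySem.List.pyGet?_zero,
      List.getElem?_drop, List.getElem?_eq_getElem hn, String.append_assoc]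
  | c1 :: c2 :: rest, curbs, res, n, lc, h => by
    have hn : n < curbs.length := by simp at h; omega
    have hrec := gp_loop rest curbs
      (res ++ "\t(at-curb " ++ c1 ++ ")\n\t(at-curb-num " ++ c1 ++ " " ++ curbs[n] ++ ")\n"
        ++ "\t(behind-car " ++ c2 ++ " " ++ c1 ++ ")\n\t(car-clear " ++ c2 ++ ")\n")
      (n + 1) (some c1) (by simp at h ⊢; omega)
    push_cast at hrec
    simp only [List.foldl_cons]
    rw [show gpStep curbs (gpStep curbs (res, (0 : Int), (n : Int), lc) c1) c2
        = (res ++ "\t(at-curb " ++ c1 ++ ")\n\t(at-curb-num " ++ c1 ++ " " ++ curbs[n] ++ ")\n"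
            ++ "\t(behind-car " ++ c2 ++ " " ++ c1 ++ ")\n\t(car-clear " ++ c2 ++ ")\n",
           (0 : Int), (n : Int) + 1, some c1) from by
      simp [gpStep, List.getElem?_eq_getElem hn]]
    rw [hrec]
    rw [show gpRef (List.drop n curbs) (c1 :: c2 :: rest)
        = "\t(at-curb " ++ c1 ++ ")\n\t(at-curb-num " ++ c1 ++ " "
            ++ (PySem.List.pyGet? (List.drop n curbs) 0).getD "" ++ ")\n"
          ++ "\t(behind-car " ++ c2 ++ " " ++ c1 ++ ")\n\t(car-clear " ++ c2 ++ ")\n"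
          ++ gpRef (List.drop 1 (List.drop n curbs)) rest from rfl]
    simp [PySem.List.pyGet?_zero, List.getElem?_drop, List.getElem?_eq_getElem hn,
      List.drop_drop, String.append_assoc]

theorem intercalate_nil_sep (l : List (List Char)) : List.intercalate [] l = l.flatten := by
  unfold List.intercalate
  induction l with
  | nil => simp
  | cons x xs ih =>
    cases xs with
    | nil => simp
    | cons y ys => simp only [List.intersperse_cons₂, List.flatten_cons] at *; simp [ih]

theorem gp_join_append (a b : List String) :
    PySem.Str.join "" (a ++ b) = PySem.Str.join "" a ++ PySem.Str.join "" b := by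
  simp [PySem.Str.join, PySem.Chars.join, intercalate_nil_sep]

theorem gp_join_singleton (s : String) : PySem.Str.join "" [s] = s := by
  simp [PySem.Str.join, PySem.Chars.join, intercalate_nil_sep]

theorem pyRange_two_cons (a b : Int) (h : a < b) :
    PySem.List.pyRange a b 2 = a :: PySem.List.pyRange (a + 2) b 2 := by
  rw [PySem.List.pyRange_of_pos a b (by norm_num), PySem.List.pyRange_of_pos (a + 2) b (by norm_num)]
  by_cases h2 : a + 2 < b
  · have hc : (if a < b then ((b - a + 2 - 1) / 2).toNat else 0)
        = (if a + 2 < b then ((b - (a + 2) + 2 - 1) / 2).toNat else 0) + 1 := by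
      simp only [if_pos h, if_pos h2]; omega
    rw [hc, List.range_succ_eq_map]
    simp only [List.map_cons, List.map_map]
    refine congrArg₂ _ (by ring_nf) ?_
    apply List.map_congr_left
    intro k _
    simp [Function.comp]
    ring
  · have hc : (if a < b then ((b - a + 2 - 1) / 2).toNat else 0) = 1 := by
      simp only [if_pos h]; omega
    have hc2 : (if a + 2 < b then ((b - (a + 2) + 2 - 1) / 2).toNat else 0) = 0 := by
      simp [h2]
    rw [hc, hc2]
    simp

theorem pyRange_two_nil (a b : Int) (h : b ≤ a) : PySem.List.pyRange a b 2 = [] := by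
  rw [PySem.List.pyRange_of_pos a b (by norm_num)]
  simp [show ¬ a < b by omega]

theorem gp_fd (m : ℕ) : PySem.Int.floordiv ((2 * m : ℕ) : Int) 2 = (m : Int) := by
  simp only [PySem.Int.floordiv]
  push_cast
  exact Int.mul_fdiv_cancel_left _ (by norm_num)

-- B's loop invariant: the fold over range(2m, len(cars), 2) appends exactly the
-- pieces of the reference output on cars.drop (2m) and curbs.drop m.
theorem gpB_loop : ∀ (suf curbs cars : List String) (m : ℕ) (acc : List String),
    cars.drop (2 * m) = suf →
    PySem.Str.join "" (List.foldl (gpBStep curbs cars) acc (PySem.List.pyRange (2 * (m : Int)) (cars.length : Int) 2))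
      = PySem.Str.join "" acc ++ gpRef (List.drop m curbs) suf
  | [], curbs, cars, m, acc, hdrop => by
    have hlen : cars.length ≤ 2 * m := by
      have := congrArg List.length hdrop; simp at this; omega
    rw [pyRange_two_nil _ _ (by exact_mod_cast hlen)]
    simp [gpRef]
  | [c], curbs, cars, m, acc, hdrop => by
    have hlen : cars.length = 2 * m + 1 := by
      have := congrArg List.length hdrop; simp at this; omega
    have hc : cars[2 * m]? = some c := by
      have : (cars.drop (2 * m))[0]? = some c := by rw [hdrop]; rfl
      simpa [List.getElem?_drop] using this
    rw [show ((cars.length : ℕ) : Int) = 2 * (m : Int) + 1 by rw [hlen]; push_cast; ring]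
    rw [pyRange_two_cons _ _ (by omega), pyRange_two_nil _ _ (by omega)]
    simp only [List.foldl_cons, List.foldl_nil]
    rw [show gpBStep curbs cars acc (2 * (m : Int))
        = acc ++ ["\t(at-curb " ++ c ++ ")\n\t(at-curb-num " ++ c ++ " " ++ (curbs[m]?).getD "" ++ ")\n"]
            ++ ["\t(car-clear " ++ c ++ ")\n"] from by
      rw [show (2 * (m : Int)) = ((2 * m : ℕ) : Int) from by push_cast; ring]
      simp only [gpBStep, PySem.List.pyGet?_natCast, gp_fd, hc]
      rw [if_neg (by rw [hlen]; push_cast; omega)]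
      simp]
    rw [gp_join_append, gp_join_append, gp_join_singleton, gp_join_singleton]
    have hm : (PySem.List.pyGet? (List.drop m curbs) 0).getD "" = (curbs[m]?).getD "" := by
      simp [PySem.List.pyGet?_zero, List.getElem?_drop]
    simp [gpRef, hm, String.append_assoc]
    rw [← String.append_assoc]
    rfl
  | c1 :: c2 :: rest, curbs, cars, m, acc, hdrop => by
    have hlen : cars.length = 2 * m + 2 + rest.length := by
      have := congrArg List.length hdrop; simp at this; omega
    have hc1 : cars[2 * m]? = some c1 := by
      have : (cars.drop (2 * m))[0]? = some c1 := by rw [hdrop]; rfl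
      simpa [List.getElem?_drop] using this
    have hc2 : cars[2 * m + 1]? = some c2 := by
      have : (cars.drop (2 * m))[1]? = some c2 := by rw [hdrop]; rfl
      simpa [List.getElem?_drop] using this
    have hrec := gpB_loop rest curbs cars (m + 1)
      (acc ++ ["\t(at-curb " ++ c1 ++ ")\n\t(at-curb-num " ++ c1 ++ " " ++ (curbs[m]?).getD "" ++ ")\n"]
        ++ ["\t(behind-car " ++ c2 ++ " " ++ c1 ++ ")\n\t(car-clear " ++ c2 ++ ")\n"])
      (by rw [show 2 * (m + 1) = 2 * m + 2 by ring, ← List.drop_drop, hdrop]; rfl)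
    rw [pyRange_two_cons _ _ (by omega)]
    simp only [List.foldl_cons]
    rw [show gpBStep curbs cars acc (2 * (m : Int))
        = acc ++ ["\t(at-curb " ++ c1 ++ ")\n\t(at-curb-num " ++ c1 ++ " " ++ (curbs[m]?).getD "" ++ ")\n"]
            ++ ["\t(behind-car " ++ c2 ++ " " ++ c1 ++ ")\n\t(car-clear " ++ c2 ++ ")\n"] from by
      rw [show (2 * (m : Int)) = ((2 * m : ℕ) : Int) from by push_cast; ring]
      simp only [gpBStep, PySem.List.pyGet?_natCast, gp_fd, hc1]
      rw [if_pos (by rw [hlen]; push_cast; omega)]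
      rw [show ((2 * m : ℕ) : Int) + 1 = ((2 * m + 1 : ℕ) : Int) from by push_cast; ring]
      simp only [PySem.List.pyGet?_natCast, hc2]
      simp]
    rw [show (2 * (m : Int)) + 2 = 2 * ((m + 1 : ℕ) : Int) by push_cast; ring, hrec]
    rw [gp_join_append, gp_join_append, gp_join_singleton, gp_join_singleton]
    have hm : (PySem.List.pyGet? (List.drop m curbs) 0).getD "" = (curbs[m]?).getD "" := by
      simp [PySem.List.pyGet?_zero, List.getElem?_drop]
    rw [show gpRef (List.drop m curbs) (c1 :: c2 :: rest)
        = "\t(at-curb " ++ c1 ++ ")\n\t(at-curb-num " ++ c1 ++ " "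
            ++ (PySem.List.pyGet? (List.drop m curbs) 0).getD "" ++ ")\n"
          ++ "\t(behind-car " ++ c2 ++ " " ++ c1 ++ ")\n\t(car-clear " ++ c2 ++ ")\n"
          ++ gpRef (List.drop 1 (List.drop m curbs)) rest from rfl]
    simp [hm, List.drop_drop, String.append_assoc]
    rw [← String.append_assoc]
    rfl

-- ===== VERDICT =====
theorem generate_predicates_spec : Claim_equal_generate_predicates := by
  intro curbs cars _ hpre
  unfold Spec_generate_predicates generate_predicates generate_predicates_alt
  have hA := gp_loop cars curbs "" 0 none
    (by simp only [Pre_generate_predicates] at hpre; omega)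
  have hB := gpB_loop cars curbs cars 0 [] (by simp)
  simp only [Nat.cast_zero, mul_zero, List.drop_zero] at hA hB
  rw [hA]
  rw [show (0 : Int) = 2 * ((0 : ℕ) : Int) by norm_num] at hB ⊢
  rw [hB]
  simp [PySem.Str.join, PySem.Chars.join, List.intercalate]
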